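-- pv_equiv track=rewrite | github.com/lemora/rna-struct-learning | src/rnasl/eval/eval_predictions_structures.py | baseline_full_stem
-- ===== SOURCE A (Python) =====
-- def baseline_full_stem(seq: str, h: int = 3) -> list[tuple[int, int]]:
--     n = len(seq)
--     pairs = []
--     i = 0
--     j = n - 1
--     while i < j:
--         if j - i - 1 >= h:
--             pairs.append((i, j))
--         i += 1
--         j -= 1
--     return pairs
-- ===== SOURCE B (Python) =====
-- def baseline_full_stem(seq: str, h: int = 3) -> list[tuple[int, int]]:
--     n = len(seq)
--     count = max(0, min((n - h) // 2, n // 2))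
--     return [(i, n - 1 - i) for i in range(count)]
-- ===== Notes on version B (the rewrite author's own statement) =====
-- stated objective: simpler
-- what changed: Replaces the two-pointer while-loop with a per-step branch by a closed-form count of valid pairs (max(0, min((n-h)//2, n//2))) and a single comprehension over that prefix.
import Mathlib
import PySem

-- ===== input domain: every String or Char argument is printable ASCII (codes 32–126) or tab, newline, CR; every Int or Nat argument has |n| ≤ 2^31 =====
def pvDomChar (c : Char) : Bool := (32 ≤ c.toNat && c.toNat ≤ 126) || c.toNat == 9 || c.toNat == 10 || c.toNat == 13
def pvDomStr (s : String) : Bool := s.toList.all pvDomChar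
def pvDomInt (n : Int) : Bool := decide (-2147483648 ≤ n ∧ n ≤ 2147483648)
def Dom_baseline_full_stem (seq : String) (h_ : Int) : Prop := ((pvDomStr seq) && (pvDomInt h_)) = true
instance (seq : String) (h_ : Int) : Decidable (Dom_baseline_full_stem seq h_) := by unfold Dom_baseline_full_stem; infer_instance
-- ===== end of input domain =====

-- B replaces A's two-pointer loop by a closed-form pair count and one comprehension (objective: simpler).

-- ===== PORT A =====
-- the while-loop of A: state (i, j, pairs), steps while i < j
def pvStemLoop (h_ : Int) (i j : Int) (pairs : List (Int × Int)) : List (Int × Int) :=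
  if i < j then
    pvStemLoop h_ (i + 1) (j - 1) (if j - i - 1 ≥ h_ then pairs ++ [(i, j)] else pairs)
  else pairs
termination_by (j - i).toNat
decreasing_by omega

def baseline_full_stem (seq : String) (h_ : Int) : List (Int × Int) :=
  let n : Int := PySem.Str.len seq
  pvStemLoop h_ 0 (n - 1) []

-- ===== PORT B =====
def baseline_full_stem_alt (seq : String) (h_ : Int) : List (Int × Int) :=
  let n : Int := PySem.Str.len seq
  let count : Int := max 0 (min (PySem.Int.floordiv (n - h_) 2) (PySem.Int.floordiv n 2))
  (PySem.List.pyRange 0 count 1).map (fun i => (i, n - 1 - i))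

-- ===== PRECONDITION & SPEC =====
def Spec_baseline_full_stem (seq : String) (h_ : Int) (out : List (Int × Int)) : Prop := out = baseline_full_stem_alt seq h_
instance (seq : String) (h_ : Int) (out : List (Int × Int)) : Decidable (Spec_baseline_full_stem seq h_ out) := by unfold Spec_baseline_full_stem; infer_instance

-- ===== CLAIM (what is proved, stated in full; the proofs are below) =====
def Claim_equal_baseline_full_stem : Prop := ∀ (seq : String) (h_ : Int), Dom_baseline_full_stem seq h_ → Spec_baseline_full_stem seq h_ (baseline_full_stem seq h_)

-- ===== LEMMAS AND PROOFS =====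

-- number of pairs A's loop appends starting from pointers (i, j)
def pvCnt (h_ i j : Int) : Nat := ((min (j - i + 1) (j - i + 1 - h_)) / 2).toNat

lemma pvCnt_zero_of_ge {h_ i j : Int} (h : ¬ i < j) : pvCnt h_ i j = 0 := by
  unfold pvCnt; omega

lemma pvCnt_zero_of_small {h_ i j : Int} (h : ¬ j - i - 1 ≥ h_) : pvCnt h_ i j = 0 := by
  unfold pvCnt; omega

lemma pvCnt_succ {h_ i j : Int} (hij : i < j) (hg : j - i - 1 ≥ h_) :
    pvCnt h_ i j = pvCnt h_ (i + 1) (j - 1) + 1 := by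
  unfold pvCnt; omega

lemma pvStemLoop_char (h_ : Int) :
    ∀ (k : Nat) (i j : Int) (pairs : List (Int × Int)), (j - i).toNat ≤ k →
      pvStemLoop h_ i j pairs =
        pairs ++ (List.range (pvCnt h_ i j)).map (fun t : Nat => (i + (t : Int), j - (t : Int))) := by
  intro k
  induction k with
  | zero =>
    intro i j pairs hk
    rw [pvStemLoop]
    have hij : ¬ i < j := by omega
    simp [hij, pvCnt_zero_of_ge hij]
  | succ m ih =>
    intro i j pairs hk
    rw [pvStemLoop]
    by_cases hij : i < j
    · simp only [hij, if_true]
      rw [ih (i + 1) (j - 1) _ (by omega)]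
      by_cases hg : j - i - 1 ≥ h_
      · simp only [hg, if_true]
        rw [pvCnt_succ hij hg, List.range_succ_eq_map, List.map_cons, List.map_map,
          List.append_assoc, List.singleton_append]
        congr 1
        congr 1
        · norm_num
        · apply List.map_congr_left
          intro t _
          simp only [Function.comp_apply, Prod.mk.injEq]
          push_cast
          omega
      · simp only [hg, if_false]
        rw [pvCnt_zero_of_small hg]
        have h0 : pvCnt h_ (i + 1) (j - 1) = 0 := by unfold pvCnt; omega
        simp [h0]
    · simp [hij, pvCnt_zero_of_ge hij]

-- the closed-form count equals the loop's count, starting from (0, n-1), for n ≥ 0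
lemma pvCount_eq (h_ n : Int) (hn : 0 ≤ n) :
    (max 0 (min (PySem.Int.floordiv (n - h_) 2) (PySem.Int.floordiv n 2))).toNat = pvCnt h_ 0 (n - 1) := by
  rw [PySem.Int.floordiv_eq_ediv_of_pos (by omega), PySem.Int.floordiv_eq_ediv_of_pos (by omega)]
  unfold pvCnt
  omega

lemma pvMain (h_ n : Int) (hn : 0 ≤ n) :
    pvStemLoop h_ 0 (n - 1) [] =
      (PySem.List.pyRange 0 (max 0 (min (PySem.Int.floordiv (n - h_) 2) (PySem.Int.floordiv n 2))) 1).map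
        (fun i => (i, n - 1 - i)) := by
  set c : Int := max 0 (min (PySem.Int.floordiv (n - h_) 2) (PySem.Int.floordiv n 2)) with hc
  rw [pvStemLoop_char h_ (n - 1 - 0).toNat 0 (n - 1) [] (by omega)]
  rw [PySem.List.pyRange_one 0 c, List.map_map, ← pvCount_eq h_ n hn, ← hc]
  simp only [List.nil_append, sub_zero]
  apply List.map_congr_left
  intro t _
  simp only [Function.comp_apply, Prod.mk.injEq]
  ring_nf
  simp

-- ===== VERDICT (by name: the statement is the Claim_ definition above) =====
theorem baseline_full_stem_spec : Claim_equal_baseline_full_stem := by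
  intro seq h_ _
  show baseline_full_stem seq h_ = baseline_full_stem_alt seq h_
  unfold baseline_full_stem baseline_full_stem_alt
  exact pvMain h_ (PySem.Str.len seq) (by simp [PySem.Str.len_eq])
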